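-- pv_equiv track=rewrite | github.com/landonholmes/advent-of-code-2020 | 10/2.py | compute_adapter_combinations
-- ===== SOURCE A (Python) =====
-- def compute_adapter_combinations(diff_jumps):
--     temp_list = []
--     number_of_possible_combinations = []
--
--     for jump in diff_jumps:
--         if jump != 3:
--             temp_list.append(jump)
--         elif jump == 3:
--             number_of_one_jumps = (len(temp_list)-1)*2
--             if len(temp_list) > 3:
--                 what_is_this_pls = (len(temp_list)-3)  # it's always 1, idk
--                 number_of_possible_combinations.append(number_of_one_jumps + what_is_this_pls)
--             elif len(temp_list) > 1:
--                 number_of_possible_combinations.append(number_of_one_jumps)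
--             temp_list = []
--
--     total_combinations_multiplied = 1
--     for combination in number_of_possible_combinations:
--         total_combinations_multiplied *= combination
--
--     return total_combinations_multiplied
-- ===== SOURCE B (Python) =====
-- def compute_adapter_combinations(diff_jumps):
--     # Recursive: locate the first 3; its index is the length of the run before it.
--     # Multiply that run's factor and recurse on everything after the 3.
--     # If there is no 3, nothing more is recorded (trailing run dropped), product is 1.
--     if 3 not in diff_jumps:
--         return 1
--     i = diff_jumps.index(3)
--     if i > 3:
--         f = (i - 1) * 2 + (i - 3)
--     elif i > 1:
--         f = (i - 1) * 2
--     else: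
--         f = 1
--     return f * compute_adapter_combinations(diff_jumps[i + 1:])
-- ===== Notes on version B (the rewrite author's own statement) =====
-- stated objective: alternative
-- what changed: B is recursive with no accumulators at all: it finds the position of the next 3 with list.index, turns that position directly into the run's factor, and multiplies it with the recursive result on the slice after the 3, instead of A's element-by-element loop building a temp list and a list of factors that a second loop multiplies.
import Mathlib
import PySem

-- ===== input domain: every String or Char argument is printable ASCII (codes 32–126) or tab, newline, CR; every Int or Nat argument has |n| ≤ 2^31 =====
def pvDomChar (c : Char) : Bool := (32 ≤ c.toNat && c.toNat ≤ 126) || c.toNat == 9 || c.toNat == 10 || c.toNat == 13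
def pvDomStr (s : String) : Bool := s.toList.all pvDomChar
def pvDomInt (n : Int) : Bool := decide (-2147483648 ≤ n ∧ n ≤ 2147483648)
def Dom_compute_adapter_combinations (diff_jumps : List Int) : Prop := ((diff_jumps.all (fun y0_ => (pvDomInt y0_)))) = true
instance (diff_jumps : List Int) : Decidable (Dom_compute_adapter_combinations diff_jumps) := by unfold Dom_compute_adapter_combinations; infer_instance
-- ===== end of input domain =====

-- B re-implements A recursively: find the next 3 with index, turn its position into the run factor, recurse on the slice after it (objective: alternative decomposition, no accumulators).


-- ===== PORT A =====
-- one loop iteration of A: state = (temp_list, number_of_possible_combinations)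
def pvAStep (s : List Int × List Int) (jump : Int) : List Int × List Int :=
  if jump ≠ 3 then (s.1 ++ [jump], s.2)
  else if jump = 3 then
    let number_of_one_jumps : Int := ((s.1.length : Int) - 1) * 2
    if (s.1.length : Int) > 3 then
      let what_is_this_pls : Int := (s.1.length : Int) - 3
      ([], s.2 ++ [number_of_one_jumps + what_is_this_pls])
    else if (s.1.length : Int) > 1 then
      ([], s.2 ++ [number_of_one_jumps])
    else ([], s.2)
  else s

def compute_adapter_combinations (diff_jumps : List Int) : Int :=
  let s := diff_jumps.foldl pvAStep ([], [])
  s.2.foldl (fun total combination => total * combination) 1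

-- ===== PORT B =====
-- recursive: index of the first 3 is the run length before it; multiply its factor with the recursion on the slice after the 3
def compute_adapter_combinations_alt (diff_jumps : List Int) : Int :=
  match h : PySem.List.index? diff_jumps 3 with
  | none => 1
  | some i =>
    (if (i : Int) > 3 then ((i : Int) - 1) * 2 + ((i : Int) - 3)
     else if (i : Int) > 1 then ((i : Int) - 1) * 2
     else 1)
    * compute_adapter_combinations_alt (PySem.List.slice diff_jumps (some ((i : Int) + 1)) none)
termination_by diff_jumps.length
decreasing_by
  obtain ⟨hk, -, -⟩ := PySem.List.getElem_of_index?_eq_some h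
  have : ((i : Int) + 1) = ((i + 1 : Nat) : Int) := by push_cast; ring
  rw [this, PySem.List.slice_from_natCast, List.length_drop]
  omega

-- ===== PRECONDITION & SPEC =====
def Spec_compute_adapter_combinations (diff_jumps : List Int) (out : Int) : Prop := out = compute_adapter_combinations_alt diff_jumps
instance (diff_jumps : List Int) (out : Int) : Decidable (Spec_compute_adapter_combinations diff_jumps out) := by unfold Spec_compute_adapter_combinations; infer_instance

-- ===== CLAIM (what is proved, stated in full; the proofs are below) =====
def Claim_equal_compute_adapter_combinations : Prop := ∀ (diff_jumps : List Int), Dom_compute_adapter_combinations diff_jumps → Spec_compute_adapter_combinations diff_jumps (compute_adapter_combinations diff_jumps)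

-- ===== LEMMAS AND PROOFS =====

def pvProdA (c : List Int) : Int := c.foldl (fun total combination => total * combination) 1

theorem pvFoldlMul (l : List Int) (a : Int) :
    l.foldl (fun total combination => total * combination) a = a * pvProdA l := by
  induction l generalizing a with
  | nil => simp [pvProdA]
  | cons x xs ih => simp only [pvProdA, List.foldl_cons, one_mul] at *; rw [ih, ih x]; ring

theorem pvProdA_append (c c' : List Int) : pvProdA (c ++ c') = pvProdA c * pvProdA c' := by
  simp only [pvProdA, List.foldl_append]
  rw [pvFoldlMul]; rfl

-- a stretch with no 3 only grows temp_list
theorem pvFoldl_no3 (l : List Int) (t c : List Int) (h : ∀ x ∈ l, x ≠ 3) :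
    l.foldl pvAStep (t, c) = (t ++ l, c) := by
  induction l generalizing t with
  | nil => simp
  | cons x xs ih =>
    have hx : x ≠ 3 := h x (by simp)
    simp only [List.foldl_cons, pvAStep, hx, if_pos, ne_eq, not_false_eq_true]
    rw [ih (t ++ [x]) (fun y hy => h y (by simp [hy]))]
    simp

-- the combinations accumulator is only appended to
theorem pvFoldl_sep (l : List Int) (t c : List Int) :
    l.foldl pvAStep (t, c) = ((l.foldl pvAStep (t, [])).1, c ++ (l.foldl pvAStep (t, [])).2) := by
  induction l generalizing t c with
  | nil => simp
  | cons x xs ih =>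
    have hstep : ∃ t' c'', pvAStep (t, []) x = (t', c'') ∧ pvAStep (t, c) x = (t', c ++ c'') := by
      by_cases hx : x = 3
      · subst hx
        by_cases h3 : ((t.length : Int) > 3)
        · exact ⟨[], [((t.length : Int) - 1) * 2 + ((t.length : Int) - 3)],
            by simp [pvAStep, h3], by simp [pvAStep, h3]⟩
        · by_cases h1 : ((t.length : Int) > 1)
          · exact ⟨[], [((t.length : Int) - 1) * 2],
            by simp [pvAStep, h3, h1], by simp [pvAStep, h3, h1]⟩
          · exact ⟨[], [], by simp [pvAStep, h3, h1], by simp [pvAStep, h3, h1]⟩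
      · exact ⟨t ++ [x], [], by simp [pvAStep, hx], by simp [pvAStep, hx]⟩
    obtain ⟨t', c'', h1, h2⟩ := hstep
    simp only [List.foldl_cons, h1, h2]
    rw [ih t' (c ++ c''), ih t' c'']
    simp

theorem pv_main (n : Nat) : ∀ xs : List Int, xs.length ≤ n →
    compute_adapter_combinations xs = compute_adapter_combinations_alt xs := by
  induction n with
  | zero =>
    intro xs hlen
    have : xs = [] := List.eq_nil_of_length_eq_zero (Nat.le_zero.mp hlen)
    subst this
    rw [compute_adapter_combinations_alt]
    split
    · rfl
    · rename_i i heq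
      rw [PySem.List.index?_eq_idxOf?] at heq
      simp at heq
  | succ n ih =>
    intro xs hlen
    rw [compute_adapter_combinations_alt]
    split
    · rename_i hidx
      have hno : (3 : Int) ∉ xs := (PySem.List.index?_eq_none_iff _ _).mp hidx
      simp only [compute_adapter_combinations]
      rw [pvFoldl_no3 xs [] [] (fun x hx => by rintro rfl; exact hno hx)]
      rfl
    · rename_i i hidx
      obtain ⟨pre, suf, hxs, hprelen, hpre3⟩ := (PySem.List.index?_eq_some_iff _ _ _).mp hidx
      -- slice after the 3 is suf
      have hslice : PySem.List.slice xs (some ((i : Int) + 1)) none = suf := by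
        have : ((i : Int) + 1) = ((i + 1 : Nat) : Int) := by push_cast; ring
        rw [this, PySem.List.slice_from_natCast, hxs, ← hprelen]
        have h3 : pre ++ 3 :: suf = (pre ++ [3]) ++ suf := by simp
        have h4 : pre.length + 1 = (pre ++ [3]).length := by simp
        rw [h3, h4, List.drop_left]
      rw [hslice]
      -- evaluate A's fold over pre ++ 3 :: suf
      simp only [compute_adapter_combinations]
      rw [hxs, List.foldl_append, pvFoldl_no3 pre [] [] (fun x hx => by rintro rfl; exact hpre3 hx),
          List.foldl_cons]
      have hstep : pvAStep (([] : List Int) ++ pre, []) 3 =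
          ([], if (i : Int) > 3 then [((i : Int) - 1) * 2 + ((i : Int) - 3)]
               else if (i : Int) > 1 then [((i : Int) - 1) * 2] else []) := by
        simp only [List.nil_append, pvAStep, ne_eq, not_true_eq_false, if_false, hprelen]
        split_ifs <;> simp
      rw [hstep, pvFoldl_sep suf]
      have hsuflen : suf.length ≤ n := by
        have := congrArg List.length hxs
        simp at this
        omega
      have hih := ih suf hsuflen
      simp only [compute_adapter_combinations] at hih
      rw [show ((suf.foldl pvAStep ([], [])).1,
            (if (i : Int) > 3 then [((i : Int) - 1) * 2 + ((i : Int) - 3)]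
             else if (i : Int) > 1 then [((i : Int) - 1) * 2] else []) ++
            (suf.foldl pvAStep ([], [])).2).2 =
          (if (i : Int) > 3 then [((i : Int) - 1) * 2 + ((i : Int) - 3)]
           else if (i : Int) > 1 then [((i : Int) - 1) * 2] else []) ++
          (suf.foldl pvAStep ([], [])).2 from rfl]
      show pvProdA _ = _
      rw [pvProdA_append, ← hih]
      congr 1
      split_ifs <;> simp [pvProdA]

-- ===== VERDICT (by name: the statement is the Claim_ definition above) =====
theorem compute_adapter_combinations_spec : Claim_equal_compute_adapter_combinations := by
  intro xs _
  exact pv_main xs.length xs le_rfl
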